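-- pv_equiv track=rewrite | github.com/kvsem/algorithm_practice | baekjoon/1003.py | count_fibonacci
-- ===== SOURCE A (Python) =====
-- def count_fibonacci(_n):
--     _zero_count = [1, 0]
--     _one_count = [0, 1]
--
--     if _n < 2:
--         return None, None
--
--     for i in range(2, _n + 1):
--         _zero_count.append(_zero_count[i - 1] + _zero_count[i - 2])
--         _one_count.append(_one_count[i - 1] + _one_count[i - 2])
--
--     return _zero_count, _one_count
-- ===== SOURCE B (Python) =====
-- def count_fibonacci(_n):
--     if _n < 2:
--         return None, None
--     z = [1, 0]
--     for i in range(2, _n + 2):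
--         z.append(z[i - 1] + z[i - 2])
--     return z[:_n + 1], z[1:]
-- ===== Notes on version B (the rewrite author's own statement) =====
-- stated objective: simpler
-- what changed: B exploits one_count[i] == zero_count[i+1]: it builds a single Fibonacci-count list z of length n+2 with one loop and returns the slices z[:n+1] and z[1:], replacing A's two parallel recurrences.
import Mathlib
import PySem

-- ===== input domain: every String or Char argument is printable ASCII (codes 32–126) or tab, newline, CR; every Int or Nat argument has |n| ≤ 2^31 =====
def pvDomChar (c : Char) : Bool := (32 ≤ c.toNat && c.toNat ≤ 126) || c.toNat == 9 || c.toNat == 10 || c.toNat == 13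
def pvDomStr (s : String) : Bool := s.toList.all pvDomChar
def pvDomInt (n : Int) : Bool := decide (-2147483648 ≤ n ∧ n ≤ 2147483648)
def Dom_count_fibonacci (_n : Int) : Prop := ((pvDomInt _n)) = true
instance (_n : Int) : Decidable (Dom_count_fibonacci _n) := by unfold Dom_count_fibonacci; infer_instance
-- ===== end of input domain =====

-- B builds one Fibonacci-count list and returns two shifted slices of it, replacing
-- A's two parallel recurrences (objective: simpler).

-- ===== PORT A =====
def count_fibonacci (_n : Int) : Option (List Int) × Option (List Int) :=
  let zero0 : List Int := [1, 0]
  let one0 : List Int := [0, 1]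
  if _n < 2 then (none, none)
  else
    let p := (PySem.List.pyRange 2 (_n + 1) 1).foldl
      (fun (p : List Int × List Int) i =>
        (p.1 ++ [PySem.List.pyGetD p.1 (i - 1) 0 + PySem.List.pyGetD p.1 (i - 2) 0],
         p.2 ++ [PySem.List.pyGetD p.2 (i - 1) 0 + PySem.List.pyGetD p.2 (i - 2) 0]))
      (zero0, one0)
    (some p.1, some p.2)

-- ===== PORT B =====
def count_fibonacci_alt (_n : Int) : Option (List Int) × Option (List Int) :=
  if _n < 2 then (none, none)
  else
    let z := (PySem.List.pyRange 2 (_n + 2) 1).foldl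
      (fun (z : List Int) i =>
        z ++ [PySem.List.pyGetD z (i - 1) 0 + PySem.List.pyGetD z (i - 2) 0]) [1, 0]
    (some (PySem.List.slice z none (some (_n + 1))), some (PySem.List.slice z (some 1) none))

-- ===== PRECONDITION & SPEC =====
def Spec_count_fibonacci (_n : Int) (out : Option (List Int) × Option (List Int)) : Prop := out = count_fibonacci_alt _n
instance (_n : Int) (out : Option (List Int) × Option (List Int)) : Decidable (Spec_count_fibonacci _n out) := by unfold Spec_count_fibonacci; infer_instance

-- ===== CLAIM (what is proved, stated in full; the proofs are below) =====
def Claim_equal_count_fibonacci : Prop := ∀ (_n : Int), Dom_count_fibonacci _n → Spec_count_fibonacci _n (count_fibonacci _n)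

-- ===== LEMMAS AND PROOFS =====

-- the common Fibonacci-count list: L k has length k + 2
def Lfib : Nat → List Int
  | 0 => [1, 0]
  | k + 1 => Lfib k ++ [PySem.List.pyGetD (Lfib k) ((k : Int) + 1) 0 + PySem.List.pyGetD (Lfib k) (k : Int) 0]

theorem Lfib_length (k : Nat) : (Lfib k).length = k + 2 := by
  induction k with
  | zero => rfl
  | succ k ih => simp [Lfib, ih]

theorem pyGetD_drop_one (xs : List Int) (j : Int) (d : Int) (hj : 0 ≤ j)
    (hlt : j + 1 < xs.length) :
    PySem.List.pyGetD (xs.drop 1) j d = PySem.List.pyGetD xs (j + 1) d := by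
  rw [PySem.List.pyGetD_eq_getElem _ _ hj (by simp; omega),
      PySem.List.pyGetD_eq_getElem _ _ (by omega) hlt,
      List.getElem_drop]
  congr 1
  omega

theorem foldB (k : Nat) :
    (PySem.List.pyRange 2 (2 + (k : Int)) 1).foldl
      (fun (z : List Int) i =>
        z ++ [PySem.List.pyGetD z (i - 1) 0 + PySem.List.pyGetD z (i - 2) 0]) [1, 0]
    = Lfib k := by
  induction k with
  | zero => rfl
  | succ k ih =>
    have h : (2 : Int) + ((k : Int) + 1) = (2 + (k : Int)) + 1 := by ring
    rw [show ((k + 1 : Nat) : Int) = (k : Int) + 1 by push_cast; ring, h,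
        PySem.List.pyRange_one_succ_right (by omega), List.foldl_append, ih]
    simp only [List.foldl_cons, List.foldl_nil, Lfib]
    rw [show (2 : Int) + (k : Int) - 1 = (k : Int) + 1 by ring,
        show (2 : Int) + (k : Int) - 2 = (k : Int) by ring]

theorem foldA (k : Nat) :
    (PySem.List.pyRange 2 (2 + (k : Int)) 1).foldl
      (fun (p : List Int × List Int) i =>
        (p.1 ++ [PySem.List.pyGetD p.1 (i - 1) 0 + PySem.List.pyGetD p.1 (i - 2) 0],
         p.2 ++ [PySem.List.pyGetD p.2 (i - 1) 0 + PySem.List.pyGetD p.2 (i - 2) 0]))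
      ([1, 0], [0, 1])
    = (Lfib k, (Lfib (k + 1)).drop 1) := by
  induction k with
  | zero => rfl
  | succ k ih =>
    have h : (2 : Int) + ((k + 1 : Nat) : Int) = (2 + (k : Int)) + 1 := by push_cast; ring
    rw [h, PySem.List.pyRange_one_succ_right (by omega), List.foldl_append, ih]
    simp only [List.foldl_cons, List.foldl_nil]
    have hlen := Lfib_length (k + 1)
    refine Prod.ext ?_ ?_
    · show Lfib k ++ _ = Lfib (k + 1)
      simp only [Lfib]
      rw [show (2 : Int) + (k : Int) - 1 = (k : Int) + 1 by ring,
          show (2 : Int) + (k : Int) - 2 = (k : Int) by ring]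
    · show (Lfib (k + 1)).drop 1 ++ _ = (Lfib (k + 2)).drop 1
      have e1 : PySem.List.pyGetD ((Lfib (k + 1)).drop 1) (2 + (k : Int) - 1) 0
          = PySem.List.pyGetD (Lfib (k + 1)) ((k : Int) + 1 + 1) 0 := by
        rw [show (2 + (k : Int) - 1) = (k : Int) + 1 by ring]
        exact pyGetD_drop_one _ _ _ (by omega) (by rw [hlen]; push_cast; omega)
      have e2 : PySem.List.pyGetD ((Lfib (k + 1)).drop 1) (2 + (k : Int) - 2) 0
          = PySem.List.pyGetD (Lfib (k + 1)) ((k : Int) + 1) 0 := by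
        rw [show (2 + (k : Int) - 2) = (k : Int) by ring]
        exact pyGetD_drop_one _ _ _ (by omega) (by rw [hlen]; push_cast; omega)
      rw [e1, e2]
      show _ = (Lfib (k + 1) ++ [PySem.List.pyGetD (Lfib (k + 1)) (((k + 1 : Nat) : Int) + 1) 0
          + PySem.List.pyGetD (Lfib (k + 1)) ((k + 1 : Nat) : Int) 0]).drop 1
      rw [List.drop_append_of_le_length (by rw [hlen]; omega),
          show (((k + 1 : Nat) : Int) + 1) = (k : Int) + 1 + 1 by push_cast; ring,
          show ((k + 1 : Nat) : Int) = (k : Int) + 1 by push_cast; ring]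

-- ===== VERDICT (by name: the statement is the Claim_ definition above) =====
theorem count_fibonacci_spec : Claim_equal_count_fibonacci := by
  intro n _
  show count_fibonacci n = count_fibonacci_alt n
  unfold count_fibonacci count_fibonacci_alt
  by_cases h : n < 2
  · simp [h]
  · simp only [h, if_false]
    obtain ⟨k, hk⟩ : ∃ k : Nat, n = 2 + (k : Int) := ⟨(n - 2).toNat, by omega⟩
    subst hk
    rw [show (2 : Int) + (k : Int) + 2 = 2 + ((k + 2 : Nat) : Int) by push_cast; ring,
        show (2 : Int) + (k : Int) + 1 = 2 + ((k + 1 : Nat) : Int) by push_cast; ring,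
        foldB (k + 2), foldA (k + 1)]
    rw [show (2 : Int) + ((k + 1 : Nat) : Int) = (((k + 3 : Nat)) : Int) by push_cast; ring,
        PySem.List.slice_to_natCast, show (1 : Int) = ((1 : Nat) : Int) by norm_num,
        PySem.List.slice_from_natCast]
    refine Prod.ext ?_ ?_
    · show some (Lfib (k + 1)) = some ((Lfib (k + 2)).take (k + 3))
      congr 1
      conv_rhs => rw [Lfib]
      rw [List.take_append_of_le_length (by rw [Lfib_length])]
      exact (List.take_of_length_le (by rw [Lfib_length])).symm
    · rfl
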